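-- pv_equiv track=rewrite | github.com/mmtondreau/SaneSDD | src/ssdd/index_manager.py | _is_excluded_dir
-- ===== SOURCE A (Python) =====
-- _EXCLUDED_DIRS = frozenset({
--     ".ssdd", ".git", ".claude", "node_modules", "__pycache__",
--     ".venv", "venv", ".env", ".tox", ".nox", ".mypy_cache",
--     ".pytest_cache", ".ruff_cache", "dist", "build",
--     ".eggs", "*.egg-info",
-- })
--
-- def _is_excluded_dir(part: str) -> bool:
--     """Check if a path component matches an excluded directory pattern."""
--     if part in _EXCLUDED_DIRS:
--         return True
--     # Handle glob-style patterns like *.egg-info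
--     return any(
--         pat.startswith("*") and part.endswith(pat[1:])
--         for pat in _EXCLUDED_DIRS
--         if "*" in pat
--     )
-- ===== SOURCE B (Python) =====
-- _PATTERNS = (
--     ".ssdd", ".git", ".claude", "node_modules", "__pycache__",
--     ".venv", "venv", ".env", ".tox", ".nox", ".mypy_cache",
--     ".pytest_cache", ".ruff_cache", "dist", "build",
--     ".eggs", "*.egg-info",
-- )
--
--
-- def _glob_match(pat: str, s: str) -> bool:
--     """Match s against a glob pattern whose only wildcard is '*'."""
--     if not pat:
--         return not s
--     if pat[0] == "*":
--         return any(_glob_match(pat[1:], s[i:]) for i in range(len(s) + 1))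
--     return bool(s) and s[0] == pat[0] and _glob_match(pat[1:], s[1:])
--
--
-- def _is_excluded_dir(part: str) -> bool:
--     """Check if a path component matches an excluded directory pattern."""
--     return any(_glob_match(pat, part) for pat in _PATTERNS)
-- ===== Notes on version B (the rewrite author's own statement) =====
-- stated objective: alternative
-- what changed: A's two-stage logic (exact frozenset membership, then a filtered any over only the wildcard patterns using startswith/endswith slicing) is replaced by one uniform pass that runs a small recursive glob matcher on every pattern; the membership test and the wildcard filter disappear.
import Mathlib
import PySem

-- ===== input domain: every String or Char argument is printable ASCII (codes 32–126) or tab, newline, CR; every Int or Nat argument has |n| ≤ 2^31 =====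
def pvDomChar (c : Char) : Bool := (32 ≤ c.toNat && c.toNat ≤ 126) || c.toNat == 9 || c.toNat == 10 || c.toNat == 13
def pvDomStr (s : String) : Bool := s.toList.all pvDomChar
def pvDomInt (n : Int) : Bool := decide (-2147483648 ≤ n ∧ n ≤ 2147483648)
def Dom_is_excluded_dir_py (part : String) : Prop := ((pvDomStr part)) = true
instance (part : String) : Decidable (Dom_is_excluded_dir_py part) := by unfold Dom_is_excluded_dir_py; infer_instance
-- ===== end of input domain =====

-- B replaces A's two-stage check (set membership, then a filtered '*'-pattern scan) by one
-- uniform pass running a recursive glob matcher on every pattern (alternative decomposition).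


-- ===== PORT A =====
def pvExcludedDirs : PySem.Set String := PySem.Set.ofList
  [".ssdd", ".git", ".claude", "node_modules", "__pycache__",
   ".venv", "venv", ".env", ".tox", ".nox", ".mypy_cache",
   ".pytest_cache", ".ruff_cache", "dist", "build",
   ".eggs", "*.egg-info"]

def is_excluded_dir_py (part : String) : Bool :=
  if PySem.Set.contains pvExcludedDirs part then true
  else
    (pvExcludedDirs.filter (fun pat => PySem.Str.isIn "*" pat)).any
      (fun pat => PySem.Str.startswith pat "*" &&
                  PySem.Str.endswith part (PySem.Str.slice pat (some 1) none))

-- ===== PORT B =====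
-- B: one recursive glob matcher (only wildcard '*'), applied uniformly to every pattern.
def pvGlobMatch : List Char → List Char → Bool
  | [], s => s.isEmpty
  | c :: p, s =>
    if c = '*' then
      (List.range (s.length + 1)).any (fun i => pvGlobMatch p (s.drop i))
    else
      match s with
      | [] => false
      | d :: t => (d == c) && pvGlobMatch p t

def pvPatterns : List String :=
  [".ssdd", ".git", ".claude", "node_modules", "__pycache__",
   ".venv", "venv", ".env", ".tox", ".nox", ".mypy_cache",
   ".pytest_cache", ".ruff_cache", "dist", "build",
   ".eggs", "*.egg-info"]

def is_excluded_dir_py_alt (part : String) : Bool :=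
  pvPatterns.any (fun pat => pvGlobMatch pat.toList part.toList)

-- ===== PRECONDITION & SPEC =====
def Spec_is_excluded_dir_py (part : String) (out : Bool) : Prop := out = is_excluded_dir_py_alt part
instance (part : String) (out : Bool) : Decidable (Spec_is_excluded_dir_py part out) := by unfold Spec_is_excluded_dir_py; infer_instance

-- ===== CLAIM =====
def Claim_equal_is_excluded_dir_py : Prop := ∀ (part : String), Dom_is_excluded_dir_py part → Spec_is_excluded_dir_py part (is_excluded_dir_py part)

-- ===== LEMMAS AND PROOFS =====

-- a star-free pattern glob-matches exactly itself
theorem pvGlobMatch_no_star (p : List Char) (hp : Decidable.decide ('*' ∈ p) = false)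
    (s : List Char) : pvGlobMatch p s = (s == p) := by
  induction p generalizing s with
  | nil => cases s <;> simp [pvGlobMatch]
  | cons c p ih =>
    simp only [List.mem_cons, decide_eq_false_iff_not, not_or] at hp
    obtain ⟨hc, hp'⟩ := hp
    have hc' : c ≠ '*' := fun h => hc h.symm
    cases s with
    | nil => simp [pvGlobMatch, hc']
    | cons d t =>
      simp [pvGlobMatch, hc', ih (by simpa using hp') t]

-- a pattern '*p' with star-free p matches exactly the strings with suffix p
theorem pvGlobMatch_star (p : List Char) (hp : Decidable.decide ('*' ∈ p) = false)
    (s : List Char) : pvGlobMatch ('*' :: p) s = true ↔ p <:+ s := by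
  show ((if ('*' : Char) = '*' then _ else _) = true) ↔ _
  rw [if_pos rfl]
  simp only [List.any_eq_true, List.mem_range]
  constructor
  · rintro ⟨i, -, h⟩
    rw [pvGlobMatch_no_star p hp] at h
    exact (beq_iff_eq.mp h) ▸ List.drop_suffix i s
  · rintro ⟨t, rfl⟩
    refine ⟨t.length, by simp, ?_⟩
    rw [pvGlobMatch_no_star p hp]
    simp

-- the '*.egg-info' pattern matches exactly the strings ending in '.egg-info'
theorem pvGlobMatch_egg (s : List Char) :
    pvGlobMatch "*.egg-info".toList s = PySem.Chars.endswith s ".egg-info".toList := by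
  have h1 : "*.egg-info".toList = '*' :: ".egg-info".toList := by decide
  rw [h1, Bool.eq_iff_iff, pvGlobMatch_star _ (by decide), PySem.Chars.endswith_iff]

-- 'if cond then True else e' as a disjunction
theorem pvIfTrueOr (a b : Bool) : (if a = true then true else b) = (a || b) := by
  cases a <;> simp

-- String equality as a Bool is toList equality
theorem pvStrBeq_eq (s t : String) : (s == t) = (s.toList == t.toList) := by
  rw [Bool.eq_iff_iff, beq_iff_eq, beq_iff_eq, String.toList_inj]

-- ===== VERDICT =====
set_option maxHeartbeats 1000000 in
theorem is_excluded_dir_py_spec : Claim_equal_is_excluded_dir_py := by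
  intro part _
  unfold Spec_is_excluded_dir_py is_excluded_dir_py is_excluded_dir_py_alt
  have hfilter : pvExcludedDirs.filter (fun pat => PySem.Str.isIn "*" pat) = ["*.egg-info"] := by
    decide
  have hslice : PySem.Str.slice "*.egg-info" (some 1) none = ".egg-info" := by decide
  rw [hfilter]
  have hl0 := pvGlobMatch_no_star ".ssdd".toList (by decide)
  have hl1 := pvGlobMatch_no_star ".git".toList (by decide)
  have hl2 := pvGlobMatch_no_star ".claude".toList (by decide)
  have hl3 := pvGlobMatch_no_star "node_modules".toList (by decide)
  have hl4 := pvGlobMatch_no_star "__pycache__".toList (by decide)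
  have hl5 := pvGlobMatch_no_star ".venv".toList (by decide)
  have hl6 := pvGlobMatch_no_star "venv".toList (by decide)
  have hl7 := pvGlobMatch_no_star ".env".toList (by decide)
  have hl8 := pvGlobMatch_no_star ".tox".toList (by decide)
  have hl9 := pvGlobMatch_no_star ".nox".toList (by decide)
  have hl10 := pvGlobMatch_no_star ".mypy_cache".toList (by decide)
  have hl11 := pvGlobMatch_no_star ".pytest_cache".toList (by decide)
  have hl12 := pvGlobMatch_no_star ".ruff_cache".toList (by decide)
  have hl13 := pvGlobMatch_no_star "dist".toList (by decide)
  have hl14 := pvGlobMatch_no_star "build".toList (by decide)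
  have hl15 := pvGlobMatch_no_star ".eggs".toList (by decide)
  simp only [pvPatterns, List.any_cons, List.any_nil, hslice, pvGlobMatch_egg,
    hl0, hl1, hl2, hl3, hl4, hl5, hl6, hl7, hl8, hl9, hl10, hl11, hl12, hl13, hl14, hl15]
  have hset : (pvExcludedDirs : List String) = pvPatterns := by decide
  have hsw : PySem.Str.startswith "*.egg-info" "*" = true := by decide
  rw [hset]
  simp only [pvPatterns, PySem.Set.contains_eq_listContains, List.contains_cons,
    List.contains_nil, pvStrBeq_eq, hsw,
    PySem.Str.endswith_eq, Bool.true_and]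
  rw [pvIfTrueOr]
  by_cases h17 : part.toList = "*.egg-info".toList
  · rw [h17]; decide
  · have h17' : (part.toList == "*.egg-info".toList) = false := by simpa using h17
    simp only [h17', Bool.or_false, Bool.or_assoc]
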